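-- pv_equiv track=rewrite | github.com/sptryogi/Lestari-v4 | constraint1.py | urai_awalan
-- ===== SOURCE A (Python) =====
-- def urai_awalan(kata):
--     """
--     Fungsi ini mengurai kata hasil imbuhan (misal: 'sublema') sehingga
--     mengembalikan kata dasar (misal: 'lema').
--     Pendekatan ini hanya menghapus awalan yang terdaftar.
--     """
--
--     # Daftar imbuhan awalan dalam bahasa Sunda (sesuai aturan yang kamu berikan)
--     # Perlu diurutkan berdasarkan panjang agar yang panjang diperiksa dulu.
--     imbuhan_awalan = [
--         "pang", "mang", "nyang", "barang", "silih",
--         "para", "pada", "ting", "pri", "per", "pra",  # imbuhan berbentuk lebih dari 2 huruf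
--         "pa", "pi", "sa", "si", "ti", "di", "ka", "nga", "ar"   # imbuhan dua huruf
--
--     ]
--
--     # Jika ada kasus khusus: misalnya apabila kata diawali "sub",
--     # yang dalam contoh diinginkan mengembalikan kata dasar dengan menghapus "sub".
--     if kata.startswith("sub"):
--         return kata[3:]
--
--     # Urutan pengecekan berdasarkan panjang imbuhan (dari yang terpanjang) agar tidak salah potong
--     for imbuhan in sorted(imbuhan_awalan, key=len, reverse=True):
--         if kata.startswith(imbuhan):
--             return kata[len(imbuhan):]
--
--     # Bila tidak ditemukan imbuhan, kembalikan kata aslinya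
--     return kata
-- ===== SOURCE B (Python) =====
-- def _buckets():
--     affixes = [
--         "pang", "mang", "nyang", "barang", "silih",
--         "para", "pada", "ting", "pri", "per", "pra",
--         "pa", "pi", "sa", "si", "ti", "di", "ka", "nga", "ar",
--         "sub",
--     ]
--     by_len = {}
--     for a in affixes:
--         by_len.setdefault(len(a), set()).add(a)
--     return sorted(by_len.items(), key=lambda kv: kv[0], reverse=True)
--
--
-- _BUCKETS = None
--
--
-- def urai_awalan(kata):
--     global _BUCKETS
--     if _BUCKETS is None:
--         _BUCKETS = _buckets()
--     for length, bucket in _BUCKETS: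
--         if kata[:length] in bucket:
--             return kata[length:]
--     return kata
-- ===== Notes on version B (the rewrite author's own statement) =====
-- stated objective: alternative
-- what changed: Instead of testing startswith for each affix of a length-sorted list (with a special-cased 'sub' check first), B builds once a dict bucketing the affixes (including 'sub') by length and, for each distinct length in descending order, slices the prefix of that length and tests set membership.
import Mathlib
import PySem

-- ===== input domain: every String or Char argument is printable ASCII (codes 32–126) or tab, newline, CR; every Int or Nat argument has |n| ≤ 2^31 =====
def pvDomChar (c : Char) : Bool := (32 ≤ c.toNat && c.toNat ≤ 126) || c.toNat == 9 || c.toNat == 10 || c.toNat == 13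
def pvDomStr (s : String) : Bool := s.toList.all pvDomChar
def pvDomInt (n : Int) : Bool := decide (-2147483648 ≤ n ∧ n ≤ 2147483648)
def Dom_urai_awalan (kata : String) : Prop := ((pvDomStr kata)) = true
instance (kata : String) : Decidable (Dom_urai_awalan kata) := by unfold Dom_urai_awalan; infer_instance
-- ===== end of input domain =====

-- B replaces A's scan over the length-sorted affix list (startswith per affix) by a
-- length-bucketed lookup: one prefix slice per distinct length, tested for set membership.

-- ===== PORT A =====
def pvAAffixes : List String :=
  ["pang", "mang", "nyang", "barang", "silih",
   "para", "pada", "ting", "pri", "per", "pra",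
   "pa", "pi", "sa", "si", "ti", "di", "ka", "nga", "ar"]

def pvALoop (kata : String) : List String → String
  | [] => kata
  | imb :: rest =>
      if PySem.Str.startswith kata imb then
        PySem.Str.slice kata (some (PySem.Str.len imb)) none
      else pvALoop kata rest

def urai_awalan (kata : String) : String :=
  if PySem.Str.startswith kata "sub" then
    PySem.Str.slice kata (some 3) none
  else
    pvALoop kata (PySem.List.sorted pvAAffixes (fun s => PySem.Str.len s) true)

-- ===== PORT B =====
def pvBAffixes : List String :=
  ["pang", "mang", "nyang", "barang", "silih",
   "para", "pada", "ting", "pri", "per", "pra",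
   "pa", "pi", "sa", "si", "ti", "di", "ka", "nga", "ar",
   "sub"]

def pvBuckets : List (Int × PySem.Set String) :=
  PySem.List.sorted
    ((pvBAffixes.foldl
        (fun d a => d.modify (PySem.Str.len a) PySem.Set.empty (fun s => PySem.Set.add s a))
        PySem.Dict.empty).items)
    (fun kv => kv.1) true

def pvAltLoop (kata : String) : List (Int × PySem.Set String) → String
  | [] => kata
  | (L, bucket) :: rest =>
      if PySem.Set.contains bucket (PySem.Str.slice kata none (some L)) then
        PySem.Str.slice kata (some L) none
      else pvAltLoop kata rest

def urai_awalan_alt (kata : String) : String := pvAltLoop kata pvBuckets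

-- ===== PRECONDITION & SPEC =====
def Spec_urai_awalan (kata : String) (out : String) : Prop := out = urai_awalan_alt kata
instance (kata : String) (out : String) : Decidable (Spec_urai_awalan kata out) := by unfold Spec_urai_awalan; infer_instance

-- ===== CLAIM (what is proved, stated in full; the proofs are below) =====
def Claim_equal_urai_awalan : Prop := ∀ (kata : String), Dom_urai_awalan kata → Spec_urai_awalan kata (urai_awalan kata)

-- ===== LEMMAS AND PROOFS =====

lemma pvSortedA_eq :
    PySem.List.sorted pvAAffixes (fun s => PySem.Str.len s) true =
      ["barang", "nyang", "silih", "pang", "mang", "para", "pada", "ting",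
       "pri", "per", "pra", "nga", "pa", "pi", "sa", "si", "ti", "di", "ka", "ar"] := by
  decide

lemma pvBuckets_eq :
    pvBuckets =
      [((6:Int), ["barang"]), (5, ["nyang", "silih"]),
       (4, ["pang", "mang", "para", "pada", "ting"]),
       (3, ["pri", "per", "pra", "nga", "sub"]),
       (2, ["pa", "pi", "sa", "si", "ti", "di", "ka", "ar"])] := by
  decide

-- the prefix-slice of length |p| equals p iff the word starts with p
lemma pvSlice_eq_iff (kata p : String) (L : Int) (hL : (p.toList.length : Int) = L) :
    PySem.Str.slice kata none (some L) = p ↔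
      PySem.Str.startswith kata p = true := by
  subst hL
  rw [String.ext_iff]
  simp only [PySem.Str.slice, PySem.Str.startswith_eq, PySem.Chars.startswith_iff,
    PySem.Chars.slice_eq_listSlice, PySem.List.slice_to_natCast, String.toList_ofList]
  rw [List.prefix_iff_eq_take, eq_comm]

-- a word starting with p cannot start with an incomparable q
lemma pvNoSw (kata p q : String) (hp : p.toList <+: kata.toList)
    (h1 : ¬ p.toList <+: q.toList) (h2 : ¬ q.toList <+: p.toList) :
    PySem.Str.startswith kata q = false := by
  rw [Bool.eq_false_iff]
  intro hq
  rw [PySem.Str.startswith_eq, PySem.Chars.startswith_iff] at hq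
  rcases List.prefix_or_prefix_of_prefix hq hp with h | h
  · exact h2 h
  · exact h1 h

lemma pvLen_barang : PySem.Str.len "barang" = 6 := by decide
lemma pvLen_nyang : PySem.Str.len "nyang" = 5 := by decide
lemma pvLen_silih : PySem.Str.len "silih" = 5 := by decide
lemma pvLen_pang : PySem.Str.len "pang" = 4 := by decide
lemma pvLen_mang : PySem.Str.len "mang" = 4 := by decide
lemma pvLen_para : PySem.Str.len "para" = 4 := by decide
lemma pvLen_pada : PySem.Str.len "pada" = 4 := by decide
lemma pvLen_ting : PySem.Str.len "ting" = 4 := by decide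
lemma pvLen_pri : PySem.Str.len "pri" = 3 := by decide
lemma pvLen_per : PySem.Str.len "per" = 3 := by decide
lemma pvLen_pra : PySem.Str.len "pra" = 3 := by decide
lemma pvLen_nga : PySem.Str.len "nga" = 3 := by decide
lemma pvLen_pa : PySem.Str.len "pa" = 2 := by decide
lemma pvLen_pi : PySem.Str.len "pi" = 2 := by decide
lemma pvLen_sa : PySem.Str.len "sa" = 2 := by decide
lemma pvLen_si : PySem.Str.len "si" = 2 := by decide
lemma pvLen_ti : PySem.Str.len "ti" = 2 := by decide
lemma pvLen_di : PySem.Str.len "di" = 2 := by decide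
lemma pvLen_ka : PySem.Str.len "ka" = 2 := by decide
lemma pvLen_ar : PySem.Str.len "ar" = 2 := by decide

theorem pv_main (kata : String) : urai_awalan kata = urai_awalan_alt kata := by
  unfold urai_awalan urai_awalan_alt
  rw [pvSortedA_eq, pvBuckets_eq]
  by_cases hsub : PySem.Str.startswith kata "sub" = true
  · have hsubL : "sub".toList <+: kata.toList := by
      rw [PySem.Str.startswith_eq, PySem.Chars.startswith_iff] at hsub; exact hsub
    have hb := pvNoSw kata "sub" "barang" hsubL (by decide) (by decide)
    have hn := pvNoSw kata "sub" "nyang" hsubL (by decide) (by decide)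
    have hsi := pvNoSw kata "sub" "silih" hsubL (by decide) (by decide)
    have hp1 := pvNoSw kata "sub" "pang" hsubL (by decide) (by decide)
    have hp2 := pvNoSw kata "sub" "mang" hsubL (by decide) (by decide)
    have hp3 := pvNoSw kata "sub" "para" hsubL (by decide) (by decide)
    have hp4 := pvNoSw kata "sub" "pada" hsubL (by decide) (by decide)
    have hp5 := pvNoSw kata "sub" "ting" hsubL (by decide) (by decide)
    simp only [hsub, if_true, pvAltLoop, PySem.Set.contains, List.contains,
      List.elem_eq_mem, List.mem_cons, List.not_mem_nil, or_false, decide_eq_true_eq,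
      pvSlice_eq_iff kata "barang" 6 (by decide),
      pvSlice_eq_iff kata "nyang" 5 (by decide),
      pvSlice_eq_iff kata "silih" 5 (by decide),
      pvSlice_eq_iff kata "pang" 4 (by decide),
      pvSlice_eq_iff kata "mang" 4 (by decide),
      pvSlice_eq_iff kata "para" 4 (by decide),
      pvSlice_eq_iff kata "pada" 4 (by decide),
      pvSlice_eq_iff kata "ting" 4 (by decide),
      pvSlice_eq_iff kata "pri" 3 (by decide),
      pvSlice_eq_iff kata "per" 3 (by decide),
      pvSlice_eq_iff kata "pra" 3 (by decide),
      pvSlice_eq_iff kata "nga" 3 (by decide),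
      pvSlice_eq_iff kata "pa" 2 (by decide),
      pvSlice_eq_iff kata "pi" 2 (by decide),
      pvSlice_eq_iff kata "sa" 2 (by decide),
      pvSlice_eq_iff kata "si" 2 (by decide),
      pvSlice_eq_iff kata "ti" 2 (by decide),
      pvSlice_eq_iff kata "di" 2 (by decide),
      pvSlice_eq_iff kata "ka" 2 (by decide),
      pvSlice_eq_iff kata "ar" 2 (by decide),
      pvSlice_eq_iff kata "sub" 3 (by decide),
      hb, hn, hsi, hp1, hp2, hp3, hp4, hp5, Bool.false_eq_true, if_true, if_false, true_or,
      or_true, false_or, or_false, eq_self_iff_true]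
  · have hsubF : PySem.Str.startswith kata "sub" = false := by
      rw [Bool.eq_false_iff]; exact hsub
    simp only [hsubF, Bool.false_eq_true, if_false, pvALoop, pvAltLoop, PySem.Set.contains,
      List.contains, List.elem_eq_mem, List.mem_cons, List.not_mem_nil, or_false,
      decide_eq_true_eq, pvSlice_eq_iff kata "sub" 3 (by decide),
      pvSlice_eq_iff kata "barang" 6 (by decide),
      pvSlice_eq_iff kata "nyang" 5 (by decide),
      pvSlice_eq_iff kata "silih" 5 (by decide),
      pvSlice_eq_iff kata "pang" 4 (by decide),
      pvSlice_eq_iff kata "mang" 4 (by decide),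
      pvSlice_eq_iff kata "para" 4 (by decide),
      pvSlice_eq_iff kata "pada" 4 (by decide),
      pvSlice_eq_iff kata "ting" 4 (by decide),
      pvSlice_eq_iff kata "pri" 3 (by decide),
      pvSlice_eq_iff kata "per" 3 (by decide),
      pvSlice_eq_iff kata "pra" 3 (by decide),
      pvSlice_eq_iff kata "nga" 3 (by decide),
      pvSlice_eq_iff kata "pa" 2 (by decide),
      pvSlice_eq_iff kata "pi" 2 (by decide),
      pvSlice_eq_iff kata "sa" 2 (by decide),
      pvSlice_eq_iff kata "si" 2 (by decide),
      pvSlice_eq_iff kata "ti" 2 (by decide),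
      pvSlice_eq_iff kata "di" 2 (by decide),
      pvSlice_eq_iff kata "ka" 2 (by decide),
      pvSlice_eq_iff kata "ar" 2 (by decide),
      pvLen_barang,
      pvLen_nyang,
      pvLen_silih,
      pvLen_pang,
      pvLen_mang,
      pvLen_para,
      pvLen_pada,
      pvLen_ting,
      pvLen_pri,
      pvLen_per,
      pvLen_pra,
      pvLen_nga,
      pvLen_pa,
      pvLen_pi,
      pvLen_sa,
      pvLen_si,
      pvLen_ti,
      pvLen_di,
      pvLen_ka,
      pvLen_ar]
    by_cases c0 : PySem.Str.startswith kata "barang" = true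
    · simp only [c0, if_true, if_false, true_or, or_true, false_or, or_false, eq_self_iff_true, Bool.false_eq_true]
    by_cases c1 : PySem.Str.startswith kata "nyang" = true
    · simp only [c0, c1, if_true, if_false, true_or, or_true, false_or, or_false, eq_self_iff_true, Bool.false_eq_true]
    by_cases c2 : PySem.Str.startswith kata "silih" = true
    · simp only [c0, c1, c2, if_true, if_false, true_or, or_true, false_or, or_false, eq_self_iff_true, Bool.false_eq_true]
    by_cases c3 : PySem.Str.startswith kata "pang" = true
    · simp only [c0, c1, c2, c3, if_true, if_false, true_or, or_true, false_or, or_false, eq_self_iff_true, Bool.false_eq_true]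
    by_cases c4 : PySem.Str.startswith kata "mang" = true
    · simp only [c0, c1, c2, c3, c4, if_true, if_false, true_or, or_true, false_or, or_false, eq_self_iff_true, Bool.false_eq_true]
    by_cases c5 : PySem.Str.startswith kata "para" = true
    · simp only [c0, c1, c2, c3, c4, c5, if_true, if_false, true_or, or_true, false_or, or_false, eq_self_iff_true, Bool.false_eq_true]
    by_cases c6 : PySem.Str.startswith kata "pada" = true
    · simp only [c0, c1, c2, c3, c4, c5, c6, if_true, if_false, true_or, or_true, false_or, or_false, eq_self_iff_true, Bool.false_eq_true]
    by_cases c7 : PySem.Str.startswith kata "ting" = true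
    · simp only [c0, c1, c2, c3, c4, c5, c6, c7, if_true, if_false, true_or, or_true, false_or, or_false, eq_self_iff_true, Bool.false_eq_true]
    by_cases c8 : PySem.Str.startswith kata "pri" = true
    · simp only [c0, c1, c2, c3, c4, c5, c6, c7, c8, if_true, if_false, true_or, or_true, false_or, or_false, eq_self_iff_true, Bool.false_eq_true]
    by_cases c9 : PySem.Str.startswith kata "per" = true
    · simp only [c0, c1, c2, c3, c4, c5, c6, c7, c8, c9, if_true, if_false, true_or, or_true, false_or, or_false, eq_self_iff_true, Bool.false_eq_true]
    by_cases c10 : PySem.Str.startswith kata "pra" = true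
    · simp only [c0, c1, c2, c3, c4, c5, c6, c7, c8, c9, c10, if_true, if_false, true_or, or_true, false_or, or_false, eq_self_iff_true, Bool.false_eq_true]
    by_cases c11 : PySem.Str.startswith kata "nga" = true
    · simp only [c0, c1, c2, c3, c4, c5, c6, c7, c8, c9, c10, c11, if_true, if_false, true_or, or_true, false_or, or_false, eq_self_iff_true, Bool.false_eq_true]
    by_cases c12 : PySem.Str.startswith kata "pa" = true
    · simp only [c0, c1, c2, c3, c4, c5, c6, c7, c8, c9, c10, c11, c12, if_true, if_false, true_or, or_true, false_or, or_false, eq_self_iff_true, Bool.false_eq_true]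
    by_cases c13 : PySem.Str.startswith kata "pi" = true
    · simp only [c0, c1, c2, c3, c4, c5, c6, c7, c8, c9, c10, c11, c12, c13, if_true, if_false, true_or, or_true, false_or, or_false, eq_self_iff_true, Bool.false_eq_true]
    by_cases c14 : PySem.Str.startswith kata "sa" = true
    · simp only [c0, c1, c2, c3, c4, c5, c6, c7, c8, c9, c10, c11, c12, c13, c14, if_true, if_false, true_or, or_true, false_or, or_false, eq_self_iff_true, Bool.false_eq_true]
    by_cases c15 : PySem.Str.startswith kata "si" = true
    · simp only [c0, c1, c2, c3, c4, c5, c6, c7, c8, c9, c10, c11, c12, c13, c14, c15, if_true, if_false, true_or, or_true, false_or, or_false, eq_self_iff_true, Bool.false_eq_true]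
    by_cases c16 : PySem.Str.startswith kata "ti" = true
    · simp only [c0, c1, c2, c3, c4, c5, c6, c7, c8, c9, c10, c11, c12, c13, c14, c15, c16, if_true, if_false, true_or, or_true, false_or, or_false, eq_self_iff_true, Bool.false_eq_true]
    by_cases c17 : PySem.Str.startswith kata "di" = true
    · simp only [c0, c1, c2, c3, c4, c5, c6, c7, c8, c9, c10, c11, c12, c13, c14, c15, c16, c17, if_true, if_false, true_or, or_true, false_or, or_false, eq_self_iff_true, Bool.false_eq_true]
    by_cases c18 : PySem.Str.startswith kata "ka" = true
    · simp only [c0, c1, c2, c3, c4, c5, c6, c7, c8, c9, c10, c11, c12, c13, c14, c15, c16, c17, c18, if_true, if_false, true_or, or_true, false_or, or_false, eq_self_iff_true, Bool.false_eq_true]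
    by_cases c19 : PySem.Str.startswith kata "ar" = true
    · simp only [c0, c1, c2, c3, c4, c5, c6, c7, c8, c9, c10, c11, c12, c13, c14, c15, c16, c17, c18, c19, if_true, if_false, true_or, or_true, false_or, or_false, eq_self_iff_true, Bool.false_eq_true]
    simp only [c0, c1, c2, c3, c4, c5, c6, c7, c8, c9, c10, c11, c12, c13, c14, c15, c16, c17, c18, c19, if_true, if_false, true_or, or_true, false_or, or_false, eq_self_iff_true, Bool.false_eq_true]

-- ===== VERDICT (by name: the statement is the Claim_ definition above) =====
theorem urai_awalan_spec : Claim_equal_urai_awalan := by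
  intro kata _
  unfold Spec_urai_awalan
  exact pv_main kata
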